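-- pv_equiv track=rewrite | github.com/samspillers/TCSS343ChallengeProblem | algorithm.py | __get_list_of_all_indexes
-- ===== SOURCE A (Python) =====
-- def __get_list_of_all_indexes(n: int, d: int, done_indexes: tuple) -> list:
--     if d is 1:
--         return [done_indexes + (i,) for i in range(n)]
--     else:
--         output = []
--         for i in range(n):
--             output.extend(__get_list_of_all_indexes(n, d - 1, done_indexes + (i,)))
--         return output
-- ===== SOURCE B (Python) =====
-- def __get_list_of_all_indexes(n: int, d: int, done_indexes: tuple) -> list:
--     prefixes = [done_indexes + (i,) for i in range(n)]
--     if not prefixes: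
--         return []
--     for _ in range(d - 1):
--         prefixes = [p + (i,) for p in prefixes for i in range(n)]
--     return prefixes
-- ===== Notes on version B (the rewrite author's own statement) =====
-- stated objective: simpler
-- what changed: Replaces recursion on depth with iterative level expansion: start from the single-index prefixes and extend every prefix by one index d-1 times, producing the same n^d tuples in the same lexicographic order.
import Mathlib
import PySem

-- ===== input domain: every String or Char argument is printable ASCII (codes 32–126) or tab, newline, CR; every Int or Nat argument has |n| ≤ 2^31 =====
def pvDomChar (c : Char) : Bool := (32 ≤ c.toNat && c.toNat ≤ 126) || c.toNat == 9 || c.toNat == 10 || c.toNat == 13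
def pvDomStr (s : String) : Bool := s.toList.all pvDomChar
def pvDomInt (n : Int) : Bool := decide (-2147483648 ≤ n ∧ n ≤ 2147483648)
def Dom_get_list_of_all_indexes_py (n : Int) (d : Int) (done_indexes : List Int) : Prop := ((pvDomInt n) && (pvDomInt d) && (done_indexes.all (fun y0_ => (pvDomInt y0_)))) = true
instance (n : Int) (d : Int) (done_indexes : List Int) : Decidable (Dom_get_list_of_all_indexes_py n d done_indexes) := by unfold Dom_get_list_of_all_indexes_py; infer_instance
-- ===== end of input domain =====

-- B replaces A's recursion on depth by iterative level expansion (extend every prefix by one index, d-1 times); objective: simpler.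


-- ===== PORT A =====
-- The 'if d ≤ 0 then []' branch is only a totality guard: there Python recurses
-- unboundedly whenever n ≥ 1 (outside Pre_), and for n ≤ 0 the Python loop body
-- never runs and [] is returned, which the guard reproduces.
def get_list_of_all_indexes_py (n : Int) (d : Int) (done_indexes : List Int) : List (List Int) :=
  if d = 1 then
    (PySem.List.pyRange 0 n 1).map (fun i => done_indexes ++ [i])
  else if d ≤ 0 then []
  else
    (PySem.List.pyRange 0 n 1).foldl
      (fun output i => output ++ get_list_of_all_indexes_py n (d - 1) (done_indexes ++ [i])) []
termination_by d.toNat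
decreasing_by omega

-- ===== PORT B =====
-- one expansion level: [p + (i,) for p in prefixes for i in range(n)]
def pvExpand (n : Int) (prefixes : List (List Int)) : List (List Int) :=
  prefixes.flatMap (fun p => (PySem.List.pyRange 0 n 1).map (fun i => p ++ [i]))

def get_list_of_all_indexes_py_alt (n : Int) (d : Int) (done_indexes : List Int) : List (List Int) :=
  if ((PySem.List.pyRange 0 n 1).map (fun i => done_indexes ++ [i])) = [] then []
  else
    (List.range (d - 1).toNat).foldl (fun prefixes _ => pvExpand n prefixes)
      ((PySem.List.pyRange 0 n 1).map (fun i => done_indexes ++ [i]))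

-- ===== PRECONDITION & SPEC =====
-- Pre_ excludes only d < 1 together with n ≥ 1, on which A recurses without bound
-- (RecursionError); for d < 1 with n ≤ 0 the loop is empty and A returns [].
def Pre_get_list_of_all_indexes_py (n : Int) (d : Int) (done_indexes : List Int) : Prop :=
  1 ≤ d ∨ n ≤ 0

instance (n : Int) (d : Int) (done_indexes : List Int) : Decidable (Pre_get_list_of_all_indexes_py n d done_indexes) := by unfold Pre_get_list_of_all_indexes_py; infer_instance

def pvWitness_get_list_of_all_indexes_py : Int × Int × List Int := (2, 2, [7])

def Spec_get_list_of_all_indexes_py (n : Int) (d : Int) (done_indexes : List Int) (out : List (List Int)) : Prop := out = get_list_of_all_indexes_py_alt n d done_indexes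
instance (n : Int) (d : Int) (done_indexes : List Int) (out : List (List Int)) : Decidable (Spec_get_list_of_all_indexes_py n d done_indexes out) := by unfold Spec_get_list_of_all_indexes_py; infer_instance

-- ===== CLAIM (what is proved, stated in full; the proofs are below) =====
def Claim_equal_get_list_of_all_indexes_py : Prop := ∀ (n : Int) (d : Int) (done_indexes : List Int), Dom_get_list_of_all_indexes_py n d done_indexes → Pre_get_list_of_all_indexes_py n d done_indexes → Spec_get_list_of_all_indexes_py n d done_indexes (get_list_of_all_indexes_py n d done_indexes)

-- ===== LEMMAS AND PROOFS =====

-- folding a constant-step function over `List.range k` is `k`-fold iteration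
theorem pv_foldl_range_iterate {α : Type} (f : α → α) (init : α) (k : Nat) :
    (List.range k).foldl (fun s _ => f s) init = f^[k] init := by
  induction k with
  | zero => rfl
  | succ k ih =>
      rw [List.range_succ, List.foldl_append, ih, Function.iterate_succ_apply']
      rfl

-- pvExpand (hence its iterates) distributes over flatMap
theorem pv_expand_flatMap {α : Type} (n : Int) (l : List α) (g : α → List (List Int)) :
    pvExpand n (l.flatMap g) = l.flatMap (fun x => pvExpand n (g x)) := by
  simp [pvExpand, List.flatMap_assoc]

theorem pv_iterate_expand_flatMap {α : Type} (n : Int) (k : Nat) (l : List α)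
    (g : α → List (List Int)) :
    (pvExpand n)^[k] (l.flatMap g) = l.flatMap (fun x => (pvExpand n)^[k] (g x)) := by
  induction k generalizing g with
  | zero => simp
  | succ k ih =>
      rw [Function.iterate_succ_apply, pv_expand_flatMap, ih]
      simp [Function.iterate_succ_apply]

-- characterisation of A as k-fold expansion of the single-index level
theorem pv_A_eq_iterate (n : Int) (k : Nat) (done : List Int) :
    get_list_of_all_indexes_py n ((k : Int) + 1) done
      = (pvExpand n)^[k] ((PySem.List.pyRange 0 n 1).map (fun i => done ++ [i])) := by
  induction k generalizing done with
  | zero => simp [get_list_of_all_indexes_py]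
  | succ k ih =>
      have hc : ((k + 1 : Nat) : Int) + 1 = (k : Int) + 1 + 1 := by push_cast; ring
      rw [hc, get_list_of_all_indexes_py]
      have h1 : ¬((k : Int) + 1 + 1 = 1) := by omega
      have h2 : ¬((k : Int) + 1 + 1 ≤ 0) := by omega
      rw [if_neg h1, if_neg h2]
      rw [PySem.List.foldl_append_eq_flatMap]
      have harg : (k : Int) + 1 + 1 - 1 = (k : Int) + 1 := by ring
      rw [harg]
      simp only [List.nil_append]
      calc (PySem.List.pyRange 0 n 1).flatMap
            (fun i => get_list_of_all_indexes_py n ((k : Int) + 1) (done ++ [i]))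
          = (PySem.List.pyRange 0 n 1).flatMap
            (fun i => (pvExpand n)^[k]
              ((PySem.List.pyRange 0 n 1).map (fun j => (done ++ [i]) ++ [j]))) := by
            simp only [ih]
        _ = (pvExpand n)^[k] ((PySem.List.pyRange 0 n 1).flatMap
              (fun i => (PySem.List.pyRange 0 n 1).map (fun j => (done ++ [i]) ++ [j]))) := by
            rw [pv_iterate_expand_flatMap]
        _ = (pvExpand n)^[k] (pvExpand n
              ((PySem.List.pyRange 0 n 1).map (fun i => done ++ [i]))) := by
            simp [pvExpand, List.flatMap_map]
        _ = (pvExpand n)^[k + 1]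
              ((PySem.List.pyRange 0 n 1).map (fun i => done ++ [i])) := by
            rw [Function.iterate_succ_apply]

-- ===== VERDICT (by name: the statement is the Claim_ definition above) =====
theorem get_list_of_all_indexes_py_spec : Claim_equal_get_list_of_all_indexes_py := by
  intro n d done _ hpre
  unfold Spec_get_list_of_all_indexes_py get_list_of_all_indexes_py_alt
  by_cases hinit : ((PySem.List.pyRange 0 n 1).map (fun i => done ++ [i])) = []
  · rw [if_pos hinit]
    by_cases hd : 1 ≤ d
    · obtain ⟨k, hk⟩ : ∃ k : Nat, d = (k : Int) + 1 := ⟨(d - 1).toNat, by omega⟩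
      subst hk
      rw [pv_A_eq_iterate, hinit]
      exact Function.iterate_fixed rfl k
    · rw [get_list_of_all_indexes_py]
      have h1 : ¬(d = 1) := by omega
      have h2 : d ≤ 0 := by omega
      rw [if_neg h1, if_pos h2]
  · rw [if_neg hinit, pv_foldl_range_iterate]
    have hd : 1 ≤ d := by
      rcases hpre with hd | hn
      · exact hd
      · exact absurd (by rw [PySem.List.pyRange_one_eq_nil hn]; rfl) hinit
    obtain ⟨k, hk⟩ : ∃ k : Nat, d = (k : Int) + 1 := ⟨(d - 1).toNat, by omega⟩
    subst hk
    simp only [add_sub_cancel_right, Int.toNat_natCast]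
    exact pv_A_eq_iterate n k done
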